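-- pv_equiv track=rewrite | github.com/qwl2333/leetcode-py3 | Companies/Microsoft/OA/n-clients-order-n-items.py | total_clients_wait_time
-- ===== SOURCE A (Python) =====
-- from collections import deque
--
-- def total_clients_wait_time(time_needed_for_each_item: list[int]) -> int:
--     q = deque()
--     for time in time_needed_for_each_item:
--         q.append(time)
--
--     res = 0
--     counter = 0
--     while q:
--         cur = q.popleft()
--         counter += 1
--         cur -= 1
--         if cur > 0:
--             q.append(cur)
--         else:
--             res += (counter % (10 ** 9))
--
--     return res
-- ===== SOURCE B (Python) =====
-- def total_clients_wait_time(time_needed_for_each_item):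
--     # Closed form: item i (effective duration ti = max(t, 1)) finishes at counter
--     # sum(min(tj, ti) for all j) - (number of later items with tj >= ti).
--     M = 10 ** 9
--     T = [t if t > 1 else 1 for t in time_needed_for_each_item]
--     res = 0
--     for i, ti in enumerate(T):
--         finish = sum(min(tj, ti) for tj in T) - sum(1 for tj in T[i + 1:] if tj >= ti)
--         res += finish % M
--     return res
-- ===== Notes on version B (the rewrite author's own statement) =====
-- stated objective: alternative
-- what changed: Replaces the unit-by-unit round-robin queue simulation with a closed-form finish time per item (sum of min(tj, ti) over all items minus the number of later items with tj >= ti).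
import Mathlib
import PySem

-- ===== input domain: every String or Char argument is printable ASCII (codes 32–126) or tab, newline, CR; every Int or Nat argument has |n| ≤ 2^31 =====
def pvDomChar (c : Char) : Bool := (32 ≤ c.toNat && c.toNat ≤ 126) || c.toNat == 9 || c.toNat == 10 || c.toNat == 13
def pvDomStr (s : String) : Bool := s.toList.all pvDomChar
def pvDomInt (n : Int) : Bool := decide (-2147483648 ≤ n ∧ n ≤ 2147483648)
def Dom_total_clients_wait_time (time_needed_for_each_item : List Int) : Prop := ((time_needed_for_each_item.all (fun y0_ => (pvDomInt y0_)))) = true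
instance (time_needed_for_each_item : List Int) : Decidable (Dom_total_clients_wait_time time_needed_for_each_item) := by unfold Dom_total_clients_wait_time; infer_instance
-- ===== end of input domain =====

-- B replaces A's unit-step round-robin queue simulation by a closed-form finish time per item
-- (an alternative algorithm whose cost depends only on n, not on the durations).

-- ===== PORT A =====
-- measure used only for termination of A's while loop: total remaining work (each item takes max(t,1) turns)
def pvMeasureA (q : List Int) : Nat := (q.map (fun t => (max t 1).toNat)).sum

-- 'while q: cur = q.popleft(); counter += 1; cur -= 1; if cur > 0: q.append(cur) else: res += counter % 10**9'
def pvLoopA (q : List Int) (counter res : Int) : Int :=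
  match q with
  | [] => res
  | x :: rest =>
    let counter' := counter + 1
    let cur := x - 1
    if cur > 0 then pvLoopA (rest ++ [cur]) counter' res
    else pvLoopA rest counter' (res + PySem.Int.mod counter' (10 ^ 9))
termination_by pvMeasureA q
decreasing_by
  · simp only [pvMeasureA, List.map_append, List.map_cons, List.sum_append, List.sum_cons,
      List.map_nil, List.sum_nil]
    omega
  · simp only [pvMeasureA, List.map_cons, List.sum_cons]
    omega

def total_clients_wait_time (time_needed_for_each_item : List Int) : Int :=
  -- q = deque(); for time in …: q.append(time)
  let q := time_needed_for_each_item.foldl (fun q t => q ++ [t]) []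
  pvLoopA q 0 0

-- ===== PORT B =====
def total_clients_wait_time_alt (time_needed_for_each_item : List Int) : Int :=
  let M : Int := 10 ^ 9
  let T : List Int := time_needed_for_each_item.map (fun t => if t > 1 then t else 1)
  (PySem.List.enumerate T 0).foldl
    (fun res p =>
      let finish : Int := (T.map (fun tj => min tj p.2)).sum
        - (((PySem.List.slice T (some (p.1 + 1)) none).filter (fun tj => tj ≥ p.2)).length : Int)
      res + PySem.Int.mod finish M) 0

-- ===== PRECONDITION & SPEC =====
def Spec_total_clients_wait_time (time_needed_for_each_item : List Int) (out : Int) : Prop := out = total_clients_wait_time_alt time_needed_for_each_item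
instance (time_needed_for_each_item : List Int) (out : Int) : Decidable (Spec_total_clients_wait_time time_needed_for_each_item out) := by unfold Spec_total_clients_wait_time; infer_instance

-- ===== CLAIM (what is proved, stated in full; the proofs are below) =====
def Claim_equal_total_clients_wait_time : Prop := ∀ (time_needed_for_each_item : List Int), Dom_total_clients_wait_time time_needed_for_each_item → Spec_total_clients_wait_time time_needed_for_each_item (total_clients_wait_time time_needed_for_each_item)

-- ===== LEMMAS AND PROOFS =====

-- effective duration of an item (nonpositive durations take one turn)
def pvT (t : Int) : Int := if t > 1 then t else 1

def pvSumMin (T : List Int) (x : Int) : Int := (T.map (fun u => min u x)).sum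

def pvCntGe (T : List Int) (x : Int) : Int := ((T.filter (fun u => u ≥ x)).length : Int)

-- closed-form finish time (relative counter) of the item at index i of queue T (of effective durations)
def pvFin (T : List Int) (i : Nat) : Int :=
  pvSumMin T (T.getD i 0) - pvCntGe (T.drop (i + 1)) (T.getD i 0)

-- the value A's loop still adds to res when the queue is T and the counter is c
def pvG (c : Int) (T : List Int) : Int :=
  ((List.range T.length).map (fun i => PySem.Int.mod (c + pvFin T i) (10 ^ 9))).sum

theorem pvCntGe_cons (u : Int) (T : List Int) (x : Int) :
    pvCntGe (u :: T) x = (if u ≥ x then 1 else 0) + pvCntGe T x := by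
  simp only [pvCntGe, List.filter_cons]
  by_cases h : u ≥ x
  · rw [if_pos (by simpa using h), if_pos h]
    simp only [List.length_cons]
    push_cast; ring
  · rw [if_neg (by simpa using h), if_neg h]
    ring

theorem pvSumMin_sub (T : List Int) (x : Int) :
    pvSumMin T x = pvSumMin T (x - 1) + pvCntGe T x := by
  induction T with
  | nil => simp [pvSumMin, pvCntGe]
  | cons u T ih =>
    rw [show pvSumMin (u :: T) x = min u x + pvSumMin T x from by simp [pvSumMin],
      show pvSumMin (u :: T) (x - 1) = min u (x - 1) + pvSumMin T (x - 1) from by simp [pvSumMin],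
      pvCntGe_cons, ih]
    split_ifs with h <;> omega

theorem pvSumMin_one (T : List Int) (h : ∀ u ∈ T, (1:Int) ≤ u) :
    pvSumMin T 1 = T.length := by
  induction T with
  | nil => simp [pvSumMin]
  | cons u T ih =>
    have hu := h u (by simp)
    simp only [pvSumMin, List.map_cons, List.sum_cons] at *
    rw [ih (fun v hv => h v (by simp [hv]))]
    simp; omega

theorem pvCntGe_one (T : List Int) (h : ∀ u ∈ T, (1:Int) ≤ u) :
    pvCntGe T 1 = T.length := by
  induction T with
  | nil => simp [pvCntGe]
  | cons u T ih =>
    have hu := h u (by simp)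
    simp only [pvCntGe, List.filter_cons] at *
    rw [if_pos (by simpa using hu)]
    have := ih (fun v hv => h v (by simp [hv]))
    simp at this ⊢
    omega

theorem pvFin_one_zero (T : List Int) (h : ∀ u ∈ T, (1:Int) ≤ u) :
    pvFin (1 :: T) 0 = 1 := by
  simp only [pvFin, List.getD_cons_zero, List.drop_succ_cons, List.drop_zero]
  simp only [pvSumMin, List.map_cons, List.sum_cons]
  have h1 : ((T.map (fun u => min u 1)).sum : Int) = pvSumMin T 1 := rfl
  rw [h1, pvSumMin_one T h, pvCntGe_one T h]
  simp

theorem pvFin_one_succ (T : List Int) (i : Nat) (hi : i < T.length)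
    (h : ∀ u ∈ T, (1:Int) ≤ u) :
    pvFin (1 :: T) (i + 1) = 1 + pvFin T i := by
  have ht : (1:Int) ≤ T.getD i 0 := by
    rw [List.getD_eq_getElem T 0 hi]
    exact h _ (List.getElem_mem hi)
  simp only [pvFin, List.getD_cons_succ, List.drop_succ_cons]
  simp only [pvSumMin, List.map_cons, List.sum_cons]
  have : min 1 (T.getD i 0) = 1 := by omega
  rw [this]; ring

theorem pvFin_step_succ (T : List Int) (x : Int) (i : Nat) (hi : i < T.length) :
    pvFin (x :: T) (i + 1) = 1 + pvFin (T ++ [x - 1]) i := by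
  have hg : (T ++ [x - 1]).getD i 0 = T.getD i 0 := by
    simp [List.getD_eq_getElem?_getD, List.getElem?_append_left hi]
  have hd : (T ++ [x - 1]).drop (i + 1) = T.drop (i + 1) ++ [x - 1] :=
    List.drop_append_of_le_length (by omega)
  simp only [pvFin, List.getD_cons_succ, List.drop_succ_cons, hg, hd]
  set t := T.getD i 0 with hts
  simp only [pvSumMin, pvCntGe, List.map_cons, List.map_append, List.sum_cons,
    List.sum_append, List.filter_append, List.length_append, List.map_nil,
    List.sum_nil, List.filter_cons, List.filter_nil]
  by_cases hc : x - 1 ≥ t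
  · rw [if_pos (by simpa using hc)]; simp; omega
  · rw [if_neg (by simpa using hc)]; simp; omega

theorem pvFin_step_zero (T : List Int) (x : Int) :
    pvFin (x :: T) 0 = 1 + pvFin (T ++ [x - 1]) T.length := by
  have hg : (T ++ [x - 1]).getD T.length 0 = x - 1 := by
    simp [List.getD_eq_getElem?_getD]
  have hd : (T ++ [x - 1]).drop (T.length + 1) = [] := by
    rw [List.drop_eq_nil_iff]; simp
  simp only [pvFin, List.getD_cons_zero, List.drop_succ_cons, List.drop_zero, hg, hd]
  have := pvSumMin_sub T x
  simp only [pvSumMin, pvCntGe, List.map_cons, List.map_append, List.sum_cons,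
    List.sum_append, List.map_nil, List.sum_nil, List.filter_nil, List.length_nil] at *
  omega

theorem pvG_one (c : Int) (T : List Int) (h : ∀ u ∈ T, (1:Int) ≤ u) :
    pvG c (1 :: T) = PySem.Int.mod (c + 1) (10 ^ 9) + pvG (c + 1) T := by
  simp only [pvG, List.length_cons, List.range_succ_eq_map, List.map_cons, List.sum_cons,
    List.map_map]
  rw [pvFin_one_zero T h]
  congr 1
  apply congrArg
  apply List.map_congr_left
  intro i hi
  simp only [Function.comp_apply]
  rw [pvFin_one_succ T i (by simpa using hi) h]
  ring_nf

theorem pvG_step (c : Int) (T : List Int) (x : Int) :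
    pvG c (x :: T) = pvG (c + 1) (T ++ [x - 1]) := by
  have L1 : pvG c (x :: T) = PySem.Int.mod (c + pvFin (x :: T) 0) (10 ^ 9)
      + ((List.range T.length).map
          (fun i => PySem.Int.mod (c + pvFin (x :: T) (i + 1)) (10 ^ 9))).sum := by
    simp [pvG, List.range_succ_eq_map, List.map_map, Function.comp_def]
  have L2 : pvG (c + 1) (T ++ [x - 1]) = ((List.range T.length).map
        (fun i => PySem.Int.mod (c + 1 + pvFin (T ++ [x - 1]) i) (10 ^ 9))).sum
      + PySem.Int.mod (c + 1 + pvFin (T ++ [x - 1]) T.length) (10 ^ 9) := by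
    simp [pvG, List.range_succ]
  have e0 : c + pvFin (x :: T) 0 = c + 1 + pvFin (T ++ [x - 1]) T.length := by
    rw [pvFin_step_zero]; ring
  have e1 : ∀ i ∈ List.range T.length,
      (fun i => PySem.Int.mod (c + pvFin (x :: T) (i + 1)) (10 ^ 9)) i
        = (fun i => PySem.Int.mod (c + 1 + pvFin (T ++ [x - 1]) i) (10 ^ 9)) i := by
    intro i hi
    simp only
    rw [pvFin_step_succ T x i (by simpa using hi)]
    ring_nf
  rw [L1, L2, e0, List.map_congr_left e1]
  omega

theorem pvLoopA_eq (N : Nat) : ∀ (q : List Int) (c r : Int), pvMeasureA q ≤ N →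
    pvLoopA q c r = r + pvG c (q.map pvT) := by
  induction N with
  | zero =>
    intro q c r hq
    match q with
    | [] => simp [pvLoopA, pvG]
    | x :: rest =>
      exfalso
      simp only [pvMeasureA, List.map_cons, List.sum_cons] at hq
      omega
  | succ N ih =>
    intro q c r hq
    match q with
    | [] => simp [pvLoopA, pvG]
    | x :: rest =>
      rw [pvLoopA]
      by_cases hx : x - 1 > 0
      · rw [if_pos hx]
        have hm : pvMeasureA (rest ++ [x - 1]) ≤ N := by
          simp only [pvMeasureA, List.map_append, List.map_cons, List.sum_append,
            List.sum_cons, List.map_nil, List.sum_nil] at hq ⊢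
          omega
        rw [ih (rest ++ [x - 1]) (c + 1) r hm]
        have hmap : (rest ++ [x - 1]).map pvT = rest.map pvT ++ [x - 1] := by
          simp [pvT]
          intro h; omega
        rw [hmap]
        have hTx : pvT x = x := by simp [pvT]; omega
        have := pvG_step c (rest.map pvT) x
        simp only [List.map_cons, hTx]
        rw [this]
      · rw [if_neg hx]
        have hm : pvMeasureA rest ≤ N := by
          simp only [pvMeasureA, List.map_cons, List.sum_cons] at hq ⊢
          omega
        rw [ih rest (c + 1) (r + PySem.Int.mod (c + 1) (10 ^ 9)) hm]
        have hTx : pvT x = 1 := by simp [pvT]; omega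
        have hall : ∀ u ∈ rest.map pvT, (1:Int) ≤ u := by
          intro u hu
          simp only [List.mem_map] at hu
          obtain ⟨t, _, rfl⟩ := hu
          simp [pvT]; omega
        simp only [List.map_cons, hTx]
        rw [pvG_one c (rest.map pvT) hall]
        ring

theorem pvFoldlAppend (L : List Int) : ∀ acc : List Int,
    L.foldl (fun q t => q ++ [t]) acc = acc ++ L := by
  induction L with
  | nil => simp
  | cons x L ih => intro acc; simp [List.foldl_cons, ih]

theorem pvAltFold (T : List Int) (S : List Int) : ∀ (k : Nat) (a : Int),
    (PySem.List.enumerate S (k : Int)).foldl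
      (fun res p => res + PySem.Int.mod ((T.map (fun tj => min tj p.2)).sum
        - (((PySem.List.slice T (some (p.1 + 1)) none).filter (fun tj => tj ≥ p.2)).length : Int)) (10 ^ 9)) a
    = a + ((List.range S.length).map (fun i =>
        PySem.Int.mod ((T.map (fun tj => min tj (S.getD i 0))).sum
          - (((T.drop (k + i + 1)).filter (fun tj => tj ≥ S.getD i 0)).length : Int)) (10 ^ 9))).sum := by
  induction S with
  | nil => intro k a; simp [PySem.List.enumerate_nil]
  | cons x S' ih =>
    intro k a
    simp only [PySem.List.enumerate_cons, List.foldl_cons]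
    have hc : ((k : Int) + 1) = ((k + 1 : Nat) : Int) := by push_cast; ring
    rw [hc, PySem.List.slice_from_natCast]
    rw [ih (k + 1)]
    rw [List.length_cons, List.range_succ_eq_map]
    simp only [List.map_cons, List.map_map, List.sum_cons, Function.comp_def,
      Nat.succ_eq_add_one, List.getD_cons_zero, List.getD_cons_succ, Nat.add_zero]
    have hsum : ((List.range S'.length).map (fun i =>
        PySem.Int.mod ((T.map (fun tj => min tj (S'.getD i 0))).sum
          - (((T.drop (k + 1 + i + 1)).filter (fun tj => tj ≥ S'.getD i 0)).length : Int)) (10 ^ 9))).sum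
      = ((List.range S'.length).map (fun i =>
        PySem.Int.mod ((T.map (fun tj => min tj (S'.getD i 0))).sum
          - (((T.drop (k + (i + 1) + 1)).filter (fun tj => tj ≥ S'.getD i 0)).length : Int)) (10 ^ 9))).sum := by
      apply congrArg
      apply List.map_congr_left
      intro i _
      rw [show k + 1 + i + 1 = k + (i + 1) + 1 from by omega]
    rw [hsum]
    ring

theorem pvAltEq (L : List Int) :
    total_clients_wait_time_alt L = pvG 0 (L.map pvT) := by
  unfold total_clients_wait_time_alt
  have h := pvAltFold (L.map (fun t => if t > 1 then t else 1))
    (L.map (fun t => if t > 1 then t else 1)) 0 0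
  rw [Nat.cast_zero] at h
  rw [h]
  have hTT : L.map (fun t => if t > 1 then t else 1) = L.map pvT := rfl
  rw [hTT]
  simp only [pvG, pvFin, pvSumMin, pvCntGe, List.length_map, zero_add]

-- ===== VERDICT (by name: the statement is the Claim_ definition above) =====
theorem total_clients_wait_time_spec : Claim_equal_total_clients_wait_time := by
  intro L _
  unfold Spec_total_clients_wait_time total_clients_wait_time
  simp only
  rw [pvFoldlAppend L [], List.nil_append]
  rw [pvLoopA_eq (pvMeasureA L) L 0 0 le_rfl, pvAltEq]
  ring
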